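-- pv_equiv track=rewrite | github.com/ak-pydev/Campus_GPT | crawler/src/crawler/utils.py | prioritize_links
-- ===== SOURCE A (Python) =====
-- PRIORITY_KEYWORDS = [
--     "about", "faculty", "academics", "program",
--     "admission", "degree", "research", "department","isss"
-- ]
--
-- def prioritize_links(links: list[str] | set[str]) -> list[str]:
--     """
--     Return URLs containing priority keywords first, then the rest.
--     """
--     priority, normal = [], []
--     for link in links:
--         if any(kw in link.lower() for kw in PRIORITY_KEYWORDS):
--             priority.append(link)
--         else:
--             normal.append(link)
--     return priority + normal
-- ===== SOURCE B (Python) =====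
-- PRIORITY_KEYWORDS = [
--     "about", "faculty", "academics", "program",
--     "admission", "degree", "research", "department","isss"
-- ]
--
-- def prioritize_links(links):
--     """Stable sort by a 0/1 priority flag: keyword links keep their order ahead of the rest."""
--     def rank(link):
--         low = link.lower()
--         return 0 if any(kw in low for kw in PRIORITY_KEYWORDS) else 1
--     return sorted(links, key=rank)
-- ===== Notes on version B (the rewrite author's own statement) =====
-- stated objective: idiomatic
-- what changed: Replaced the two-accumulator partition-and-concatenate loop by a single stable sort on a 0/1 priority key, relying on sort stability to preserve within-group order.
import Mathlib
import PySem

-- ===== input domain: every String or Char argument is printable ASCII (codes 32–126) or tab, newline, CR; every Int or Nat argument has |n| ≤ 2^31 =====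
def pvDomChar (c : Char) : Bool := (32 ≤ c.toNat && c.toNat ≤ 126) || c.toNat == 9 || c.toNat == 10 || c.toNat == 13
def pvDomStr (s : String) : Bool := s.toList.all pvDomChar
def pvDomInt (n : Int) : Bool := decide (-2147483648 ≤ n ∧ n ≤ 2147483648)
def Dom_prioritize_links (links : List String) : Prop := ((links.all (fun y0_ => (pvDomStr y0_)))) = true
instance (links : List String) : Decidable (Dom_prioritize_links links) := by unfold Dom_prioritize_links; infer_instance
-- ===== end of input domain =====

-- B replaces A's two-accumulator partition loop by one stable sort on a 0/1 priority key (idiomatic, same result).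

-- ===== PORT A =====
def PRIORITY_KEYWORDS : List String :=
  ["about", "faculty", "academics", "program",
   "admission", "degree", "research", "department", "isss"]

def prioritize_links (links : List String) : List String :=
  let r := links.foldl
    (fun (acc : List String × List String) link =>
      if PRIORITY_KEYWORDS.any (fun kw => PySem.Str.isIn kw (PySem.Str.lower link)) then
        (acc.1 ++ [link], acc.2)
      else
        (acc.1, acc.2 ++ [link]))
    ([], [])
  r.1 ++ r.2

-- ===== PORT B =====
def pvRank (link : String) : Int :=
  if PRIORITY_KEYWORDS.any (fun kw => PySem.Str.isIn kw (PySem.Str.lower link)) then 0 else 1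

def prioritize_links_alt (links : List String) : List String :=
  PySem.List.sorted links pvRank

-- ===== PRECONDITION & SPEC =====
def Spec_prioritize_links (links : List String) (out : List String) : Prop := out = prioritize_links_alt links
instance (links : List String) (out : List String) : Decidable (Spec_prioritize_links links out) := by unfold Spec_prioritize_links; infer_instance

-- ===== CLAIM (what is proved, stated in full; the proofs are below) =====
def Claim_equal_prioritize_links : Prop := ∀ (links : List String), Dom_prioritize_links links → Spec_prioritize_links links (prioritize_links links)

-- ===== LEMMAS AND PROOFS =====

lemma pvRank_cases (x : String) : pvRank x = 0 ∨ pvRank x = 1 := by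
  unfold pvRank; split <;> simp

-- inserting a rank-1 element goes to the very end
lemma pv_ins1 (x : String) (hx : pvRank x = 1) (ys : List String) :
    PySem.List.insertBy (fun a b => decide (pvRank a < pvRank b)) x ys = ys ++ [x] := by
  apply PySem.List.insertBy_of_forall_not_before
  intro y _
  rcases pvRank_cases y with h | h <;> simp [h, hx]

-- inserting a rank-0 element lands between the rank-0 prefix and the rank-1 suffix
lemma pv_ins0 (x : String) (hx : pvRank x = 0) (P N : List String)
    (hP : ∀ y ∈ P, pvRank y = 0) (hN : ∀ y ∈ N, pvRank y = 1) :
    PySem.List.insertBy (fun a b => decide (pvRank a < pvRank b)) x (P ++ N) = P ++ x :: N := by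
  induction P with
  | nil =>
      cases N with
      | nil => simp [PySem.List.insertBy]
      | cons n ns =>
          have hn : pvRank n = 1 := hN n (by simp)
          simp [PySem.List.insertBy, hn, hx]
  | cons p ps ih =>
      have hp : pvRank p = 0 := hP p (by simp)
      have : ¬ (pvRank x < pvRank p) := by omega
      simp only [List.cons_append, PySem.List.insertBy]
      rw [if_neg (by simp [this])]
      rw [ih (fun y hy => hP y (by simp [hy]))]

-- A's loop over the rest, started from any well-formed split state, equals B's insertion folds
lemma pv_main (links P N : List String)
    (hP : ∀ y ∈ P, pvRank y = 0) (hN : ∀ y ∈ N, pvRank y = 1) :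
    (links.foldl
      (fun (acc : List String × List String) link =>
        if PRIORITY_KEYWORDS.any (fun kw => PySem.Str.isIn kw (PySem.Str.lower link)) then
          (acc.1 ++ [link], acc.2)
        else
          (acc.1, acc.2 ++ [link])) (P, N)).1 ++
    (links.foldl
      (fun (acc : List String × List String) link =>
        if PRIORITY_KEYWORDS.any (fun kw => PySem.Str.isIn kw (PySem.Str.lower link)) then
          (acc.1 ++ [link], acc.2)
        else
          (acc.1, acc.2 ++ [link])) (P, N)).2 =
    links.foldl
      (fun acc x => PySem.List.insertBy (fun a b => decide (pvRank a < pvRank b)) x acc) (P ++ N) := by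
  induction links generalizing P N with
  | nil => simp
  | cons x rest ih =>
      by_cases hx : PRIORITY_KEYWORDS.any (fun kw => PySem.Str.isIn kw (PySem.Str.lower x)) = true
      · have hr : pvRank x = 0 := by unfold pvRank; rw [if_pos hx]
        simp only [List.foldl_cons, if_pos hx]
        rw [pv_ins0 x hr P N hP hN]
        have := ih (P ++ [x]) N
          (by intro y hy; rcases List.mem_append.1 hy with h | h
              · exact hP y h
              · simp at h; subst h; exact hr) hN
        simpa using this
      · have hr : pvRank x = 1 := by unfold pvRank; rw [if_neg hx]
        simp only [List.foldl_cons, if_neg hx]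
        rw [pv_ins1 x hr (P ++ N)]
        have := ih P (N ++ [x]) hP
          (by intro y hy; rcases List.mem_append.1 hy with h | h
              · exact hN y h
              · simp at h; subst h; exact hr)
        simpa using this

-- ===== VERDICT (by name: the statement is the Claim_ definition above) =====
theorem prioritize_links_spec : Claim_equal_prioritize_links := by
  intro links _
  unfold Spec_prioritize_links prioritize_links prioritize_links_alt
  rw [PySem.List.sorted_eq_foldl_insertBy]
  simpa using pv_main links [] [] (by simp) (by simp)
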